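-- pv_equiv track=rewrite | github.com/Averbea/AdventOfCode | 2022/08/solution.py | get_view_dist
-- ===== SOURCE A (Python) =====
-- def in_bounds(x_pos, y_pos, width, height):
--     """checks if x_pos and y_pos is in the boundaries"""
--     return 0 <= x_pos < width and 0 <= y_pos < height
--
-- def step(x_pos, y_pos, direction):
--     """returns x and y while stepping one step into direction from x_pos, y_pos"""
--     match direction:
--         case "right":
--             return x_pos+1, y_pos
--         case "left":
--             return x_pos-1, y_pos
--         case "up":
--             return x_pos, y_pos-1
--         case "down":
--             return x_pos, y_pos+1
--     return -1, -1
--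
-- def get_view_dist(forest, y_pos, x_pos, direction):
--     """return the view distance in forest from a position looking into direction"""
--     height = len(forest)
--     width = len(forest[0])
--
--     cur_height = forest[y_pos][x_pos]
--     view_dist = 0
--     x_pos, y_pos = step(x_pos, y_pos, direction)
--     while in_bounds(x_pos, y_pos, width, height):
--         new_tree_height = forest[y_pos][x_pos]
--         if new_tree_height < cur_height:
--             # we can still see something: increase viewdistance and do a step
--             view_dist += 1
--             x_pos, y_pos = step(x_pos, y_pos, direction)
--         elif new_tree_height >= cur_height:
--             # the cur tree is bigger or equal to the origin tree
--             return view_dist + 1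
--     # the edge is reached
--     return view_dist
-- ===== SOURCE B (Python) =====
-- def get_view_dist(forest, y_pos, x_pos, direction):
--     """return the view distance in forest from a position looking into direction"""
--     cur = forest[y_pos][x_pos]
--     if direction == "right":
--         line = forest[y_pos][x_pos + 1:]
--     elif direction == "left":
--         line = forest[y_pos][:x_pos][::-1]
--     elif direction == "down":
--         line = [row[x_pos] for row in forest[y_pos + 1:]]
--     elif direction == "up":
--         line = [row[x_pos] for row in forest[:y_pos]][::-1]
--     else:
--         line = []
--     dist = 0
--     for tree in line:
--         dist += 1
--         if tree >= cur:
--             return dist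
--     return dist
-- ===== Notes on version B (the rewrite author's own statement) =====
-- stated objective: simpler
-- what changed: B replaces A's coordinate-stepping while loop (step/in_bounds machinery) by extracting the 1-D line of trees past the origin with a direction-specific slice/column gather and doing one linear scan over that list.
-- outside the precondition, e.g. on get_view_dist([[1, 2]], 0, -2, 'right'): A returns 0, B returns 1; on get_view_dist([[5], [1, 2]], 1, 0, 'right'): A returns 0, B returns 1; on get_view_dist([[2], [5], []], 0, 0, 'down'): A returns 1, B raises IndexError
import Mathlib
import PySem

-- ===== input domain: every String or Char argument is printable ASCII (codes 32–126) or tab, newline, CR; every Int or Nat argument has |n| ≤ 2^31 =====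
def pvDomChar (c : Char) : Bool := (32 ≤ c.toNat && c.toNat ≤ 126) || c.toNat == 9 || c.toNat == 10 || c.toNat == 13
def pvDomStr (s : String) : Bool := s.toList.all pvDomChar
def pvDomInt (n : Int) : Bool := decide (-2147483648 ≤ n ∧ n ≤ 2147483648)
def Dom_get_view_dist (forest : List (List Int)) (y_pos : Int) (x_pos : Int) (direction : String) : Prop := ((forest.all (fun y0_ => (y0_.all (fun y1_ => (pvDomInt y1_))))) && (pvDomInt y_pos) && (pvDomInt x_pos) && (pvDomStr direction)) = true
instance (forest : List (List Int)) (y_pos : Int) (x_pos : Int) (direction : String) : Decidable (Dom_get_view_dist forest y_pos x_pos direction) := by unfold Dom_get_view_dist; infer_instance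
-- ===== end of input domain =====

-- B extracts the 1-D line of trees past the origin (slice of the row, or a gathered column)
-- and counts along it in one scan, replacing A's step/in_bounds coordinate walk; objective: simpler.

-- ===== PORT A =====
def pv_in_bounds (x_pos y_pos width height : Int) : Bool :=
  decide (0 ≤ x_pos ∧ x_pos < width) && decide (0 ≤ y_pos ∧ y_pos < height)

def pv_step (x_pos y_pos : Int) (direction : String) : Int × Int :=
  if direction = "right" then (x_pos + 1, y_pos)
  else if direction = "left" then (x_pos - 1, y_pos)
  else if direction = "up" then (x_pos, y_pos - 1)
  else if direction = "down" then (x_pos, y_pos + 1)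
  else (-1, -1)

-- A's while loop; the fuel is a pure totality guard (inside the bounds a coordinate moves
-- strictly monotonically, so width+height+2 steps always suffice).
def pvLoopA (forest : List (List Int)) (cur w h : Int) (d : String) :
    Nat → Int → Int → Int → Int
  | 0, _, _, vd => vd
  | fuel + 1, x, y, vd =>
    if pv_in_bounds x y w h then
      let nt := (PySem.List.pyGet? ((PySem.List.pyGet? forest y).getD []) x).getD 0
      if nt < cur then
        let p := pv_step x y d
        pvLoopA forest cur w h d fuel p.1 p.2 (vd + 1)
      else vd + 1
    else vd

def get_view_dist (forest : List (List Int)) (y_pos : Int) (x_pos : Int) (direction : String) : Int :=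
  let h : Int := forest.length
  let w : Int := ((PySem.List.pyGet? forest 0).getD []).length
  let cur := (PySem.List.pyGet? ((PySem.List.pyGet? forest y_pos).getD []) x_pos).getD 0
  let p := pv_step x_pos y_pos direction
  pvLoopA forest cur w h direction (w + h + 2).toNat p.1 p.2 0

-- ===== PORT B =====
def pvScanB (cur : Int) : List Int → Int → Int
  | [], dist => dist
  | t :: rest, dist => if t ≥ cur then dist + 1 else pvScanB cur rest (dist + 1)

def get_view_dist_alt (forest : List (List Int)) (y_pos : Int) (x_pos : Int) (direction : String) : Int :=
  let cur := (PySem.List.pyGet? ((PySem.List.pyGet? forest y_pos).getD []) x_pos).getD 0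
  let line : List Int :=
    if direction = "right" then
      PySem.List.slice ((PySem.List.pyGet? forest y_pos).getD []) (some (x_pos + 1)) none
    else if direction = "left" then
      (PySem.List.slice ((PySem.List.pyGet? forest y_pos).getD []) none (some x_pos)).reverse
    else if direction = "down" then
      (PySem.List.slice forest (some (y_pos + 1)) none).map
        (fun row => ((PySem.List.pyGet? row x_pos).getD 0))
    else if direction = "up" then
      ((PySem.List.slice forest none (some y_pos)).map
        (fun row => ((PySem.List.pyGet? row x_pos).getD 0))).reverse
    else []
  pvScanB cur line 0

-- ===== PRECONDITION & SPEC =====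
-- Pre_ restricts to the function's natural domain plus the wrap corners where both agree:
-- non-empty grid, in-range origin, and for a real direction an origin compatible with A's
-- rectangular-grid stepping (or a provably empty line of sight); it excludes inputs where A
-- raises (empty grid, origin or swept tree missing), where the natural B raises on a too-short
-- swept row, and the corners where A's value mixes negative-index wraparound for the origin
-- with literal negative-coordinate stepping or truncates by row 0's width on ragged grids.
def Pre_get_view_dist (forest : List (List Int)) (y_pos : Int) (x_pos : Int) (direction : String) : Prop :=
  let w0 : Int := (forest.headD []).length
  let rl : Int := ((PySem.List.pyGet? forest y_pos).getD []).length
  let h : Int := forest.length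
  forest ≠ [] ∧ -h ≤ y_pos ∧ y_pos < h ∧ -rl ≤ x_pos ∧ x_pos < rl ∧
  (direction = "down" →
    (∀ row ∈ PySem.List.slice forest (some (y_pos + 1)) none,
      -(row.length : Int) ≤ x_pos ∧ x_pos < (row.length : Int)) ∧
    ((-1 ≤ y_pos ∧ 0 ≤ x_pos ∧ x_pos < w0) ∨ y_pos = h - 1)) ∧
  (direction = "up" →
    (∀ row ∈ PySem.List.slice forest none (some y_pos),
      -(row.length : Int) ≤ x_pos ∧ x_pos < (row.length : Int)) ∧
    ((0 ≤ y_pos ∧ 0 ≤ x_pos ∧ x_pos < w0) ∨ y_pos = 0 ∨ y_pos = -h)) ∧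
  (direction = "right" →
    (0 ≤ y_pos ∧ -1 ≤ x_pos ∧ x_pos < w0 ∧ rl = w0) ∨
    (0 ≤ y_pos ∧ x_pos = rl - 1 ∧ w0 ≤ rl)) ∧
  (direction = "left" →
    (0 ≤ y_pos ∧ 0 ≤ x_pos ∧ x_pos < w0 ∧ rl = w0) ∨
    (0 ≤ y_pos ∧ (x_pos = 0 ∨ x_pos = -rl)))

instance (forest : List (List Int)) (y_pos : Int) (x_pos : Int) (direction : String) : Decidable (Pre_get_view_dist forest y_pos x_pos direction) := by
  unfold Pre_get_view_dist; infer_instance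

def pvWitness_get_view_dist : List (List Int) × Int × Int × String :=
  ([[3, 0, 3], [2, 5, 1], [6, 5, 3]], 1, 1, "right")

def Spec_get_view_dist (forest : List (List Int)) (y_pos : Int) (x_pos : Int) (direction : String) (out : Int) : Prop := out = get_view_dist_alt forest y_pos x_pos direction
instance (forest : List (List Int)) (y_pos : Int) (x_pos : Int) (direction : String) (out : Int) : Decidable (Spec_get_view_dist forest y_pos x_pos direction out) := by unfold Spec_get_view_dist; infer_instance

-- ===== CLAIM (what is proved, stated in full; the proofs are below) =====
def Claim_equal_get_view_dist : Prop := ∀ (forest : List (List Int)) (y_pos : Int) (x_pos : Int) (direction : String), Dom_get_view_dist forest y_pos x_pos direction → Pre_get_view_dist forest y_pos x_pos direction → Spec_get_view_dist forest y_pos x_pos direction (get_view_dist forest y_pos x_pos direction)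

-- ===== LEMMAS AND PROOFS =====

lemma take_reverse_succ {α : Type} (l : List α) (n : Nat) (h : n < l.length) :
    (l.take (n + 1)).reverse = l[n] :: (l.take n).reverse := by
  rw [List.take_add_one, List.getElem?_eq_getElem h]
  simp

lemma map_take_reverse_succ {α β : Type} (f : α → β) (l : List α) (n : Nat) (h : n < l.length) :
    ((l.take (n + 1)).map f).reverse = f l[n] :: ((l.take n).map f).reverse := by
  have h2 : n < (l.map f).length := by simpa using h
  rw [List.map_take, List.map_take, take_reverse_succ (l.map f) n h2, List.getElem_map]

-- the list of tree heights A's walk visits while in bounds (stopping is handled by the scan)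
def pvPath (forest : List (List Int)) (w h : Int) (d : String) : Nat → Int → Int → List Int
  | 0, _, _ => []
  | fuel + 1, x, y =>
    if pv_in_bounds x y w h then
      ((PySem.List.pyGet? ((PySem.List.pyGet? forest y).getD []) x).getD 0) ::
        pvPath forest w h d fuel (pv_step x y d).1 (pv_step x y d).2
    else []

lemma loop_eq_scan (forest : List (List Int)) (cur w h : Int) (d : String) :
    ∀ (fuel : Nat) (x y vd : Int),
      pvLoopA forest cur w h d fuel x y vd = pvScanB cur (pvPath forest w h d fuel x y) vd := by
  intro fuel
  induction fuel with
  | zero => intro x y vd; simp [pvLoopA, pvPath, pvScanB]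
  | succ f ih =>
    intro x y vd
    simp only [pvLoopA, pvPath]
    by_cases hb : pv_in_bounds x y w h
    · simp only [hb, if_true, pvScanB]
      by_cases hlt : (PySem.List.pyGet? ((PySem.List.pyGet? forest y).getD []) x).getD 0 < cur
      · rw [if_pos hlt, if_neg (by omega), ih]
      · rw [if_neg hlt, if_pos (by omega)]
    · simp [hb, pvScanB]

lemma path_right (forest : List (List Int)) (w h : Int) (row : List Int) (y : Int)
    (hy : 0 ≤ y) (hyh : y < h)
    (hrow : (PySem.List.pyGet? forest y).getD [] = row) (hlen : (row.length : Int) = w) :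
    ∀ (fuel : Nat) (x : Int), 0 ≤ x → x ≤ w → w - x ≤ (fuel : Int) →
      pvPath forest w h "right" fuel x y = row.drop x.toNat := by
  intro fuel
  induction fuel with
  | zero =>
    intro x hx hxw hf
    have : x.toNat = row.length := by omega
    simp [pvPath, this]
  | succ f ih =>
    intro x hx hxw hf
    by_cases hxlt : x < w
    · have hb : pv_in_bounds x y w h = true := by
        simp [pv_in_bounds]; omega
      have hstep : pv_step x y "right" = (x + 1, y) := by simp [pv_step]
      have hnat : x.toNat < row.length := by omega
      have hget : (PySem.List.pyGet? ((PySem.List.pyGet? forest y).getD []) x).getD 0 = row[x.toNat] := by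
        rw [hrow, PySem.List.pyGet?_of_nonneg _ hx]
        simp [List.getElem?_eq_getElem hnat]
      have hdrop : row.drop x.toNat = row[x.toNat] :: row.drop (x.toNat + 1) :=
        List.drop_eq_getElem_cons hnat
      have hx1 : (x + 1).toNat = x.toNat + 1 := by omega
      simp only [pvPath, hb, if_true, hstep, hget]
      rw [ih (x + 1) (by omega) (by omega) (by omega), hdrop, hx1]
    · have hb : pv_in_bounds x y w h = false := by
        simp [pv_in_bounds]; omega
      have : x.toNat = row.length := by omega
      simp [pvPath, hb, this]

lemma path_left (forest : List (List Int)) (w h : Int) (row : List Int) (y : Int)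
    (hy : 0 ≤ y) (hyh : y < h)
    (hrow : (PySem.List.pyGet? forest y).getD [] = row) (hlen : (row.length : Int) = w) :
    ∀ (fuel : Nat) (x : Int), -1 ≤ x → x < w → x + 1 ≤ (fuel : Int) →
      pvPath forest w h "left" fuel x y = (row.take (x + 1).toNat).reverse := by
  intro fuel
  induction fuel with
  | zero =>
    intro x hx hxw hf
    have : (x + 1).toNat = 0 := by omega
    simp [pvPath, this]
  | succ f ih =>
    intro x hx hxw hf
    by_cases hx0 : 0 ≤ x
    · have hb : pv_in_bounds x y w h = true := by
        simp [pv_in_bounds]; omega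
      have hstep : pv_step x y "left" = (x - 1, y) := by simp [pv_step]
      have hnat : x.toNat < row.length := by omega
      have hget : (PySem.List.pyGet? ((PySem.List.pyGet? forest y).getD []) x).getD 0 = row[x.toNat] := by
        rw [hrow, PySem.List.pyGet?_of_nonneg _ hx0]
        simp [List.getElem?_eq_getElem hnat]
      have hx1 : (x + 1).toNat = x.toNat + 1 := by omega
      have hx2 : (x - 1 + 1).toNat = x.toNat := by omega
      simp only [pvPath, hb, if_true, hstep, hget]
      rw [ih (x - 1) (by omega) (by omega) (by omega), hx2, hx1,
        take_reverse_succ row x.toNat hnat]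
    · have hb : pv_in_bounds x y w h = false := by
        simp [pv_in_bounds]; omega
      have : (x + 1).toNat = 0 := by omega
      simp [pvPath, hb, this]

lemma path_down (forest : List (List Int)) (w h x : Int)
    (hx : 0 ≤ x) (hxw : x < w) (hh : h = (forest.length : Int)) :
    ∀ (fuel : Nat) (y : Int), 0 ≤ y → y ≤ h → h - y ≤ (fuel : Int) →
      pvPath forest w h "down" fuel x y
        = (forest.drop y.toNat).map (fun r => (PySem.List.pyGet? r x).getD 0) := by
  intro fuel
  induction fuel with
  | zero =>
    intro y hy hyh hf
    have : y.toNat = forest.length := by omega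
    simp [pvPath, this]
  | succ f ih =>
    intro y hy hyh hf
    by_cases hylt : y < h
    · have hb : pv_in_bounds x y w h = true := by
        simp [pv_in_bounds]; omega
      have hstep : pv_step x y "down" = (x, y + 1) := by simp [pv_step]
      have hnat : y.toNat < forest.length := by omega
      have hget : (PySem.List.pyGet? forest y).getD [] = forest[y.toNat] := by
        rw [PySem.List.pyGet?_of_nonneg _ hy]
        simp [List.getElem?_eq_getElem hnat]
      have hdrop : forest.drop y.toNat = forest[y.toNat] :: forest.drop (y.toNat + 1) :=
        List.drop_eq_getElem_cons hnat
      have hy1 : (y + 1).toNat = y.toNat + 1 := by omega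
      simp only [pvPath, hb, if_true, hstep, hget]
      rw [ih (y + 1) (by omega) (by omega) (by omega), hy1, hdrop, List.map_cons]
    · have hb : pv_in_bounds x y w h = false := by
        simp [pv_in_bounds]; omega
      have : y.toNat = forest.length := by omega
      simp [pvPath, hb, this]

lemma path_up (forest : List (List Int)) (w h x : Int)
    (hx : 0 ≤ x) (hxw : x < w) (hh : h = (forest.length : Int)) :
    ∀ (fuel : Nat) (y : Int), -1 ≤ y → y < h → y + 1 ≤ (fuel : Int) →
      pvPath forest w h "up" fuel x y
        = ((forest.take (y + 1).toNat).map (fun r => (PySem.List.pyGet? r x).getD 0)).reverse := by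
  intro fuel
  induction fuel with
  | zero =>
    intro y hy hyh hf
    have : (y + 1).toNat = 0 := by omega
    simp [pvPath, this]
  | succ f ih =>
    intro y hy hyh hf
    by_cases hy0 : 0 ≤ y
    · have hb : pv_in_bounds x y w h = true := by
        simp [pv_in_bounds]; omega
      have hstep : pv_step x y "up" = (x, y - 1) := by simp [pv_step]
      have hnat : y.toNat < forest.length := by omega
      have hget : (PySem.List.pyGet? forest y).getD [] = forest[y.toNat] := by
        rw [PySem.List.pyGet?_of_nonneg _ hy0]
        simp [List.getElem?_eq_getElem hnat]
      have hy1 : (y + 1).toNat = y.toNat + 1 := by omega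
      have hy2 : (y - 1 + 1).toNat = y.toNat := by omega
      simp only [pvPath, hb, if_true, hstep, hget]
      rw [ih (y - 1) (by omega) (by omega) (by omega), hy2, hy1,
        map_take_reverse_succ _ forest y.toNat hnat]
    · have hb : pv_in_bounds x y w h = false := by
        simp [pv_in_bounds]; omega
      have : (y + 1).toNat = 0 := by omega
      simp [pvPath, hb, this]

-- ===== VERDICT (by name: the statement is the Claim_ definition above) =====
theorem get_view_dist_spec : Claim_equal_get_view_dist := by
  intro forest y_pos x_pos direction _ hpre
  obtain ⟨hne, hyl, hyh, hxl, hxh, hdn, hup, hrt, hlf⟩ := hpre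
  unfold Spec_get_view_dist get_view_dist get_view_dist_alt
  set w : Int := (((PySem.List.pyGet? forest 0).getD []).length : Int) with hw
  have hH : (0:Int) < forest.length := by
    cases forest with
    | nil => exact absurd rfl hne
    | cons a l => simp
  have hw0 : (PySem.List.pyGet? forest 0).getD [] = forest.headD [] := by
    cases forest with
    | nil => exact absurd rfl hne
    | cons a l => simp
  have hwlen : w = ((forest.headD []).length : Int) := by rw [hw, hw0]
  have hfuel : ((w + (forest.length : Int) + 2).toNat : Int) = w + forest.length + 2 := by omega
  rw [loop_eq_scan]
  by_cases hr : direction = "right"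
  · subst hr
    have hC : (0 ≤ y_pos ∧ -1 ≤ x_pos ∧ x_pos < ((forest.headD []).length : Int) ∧
        (((PySem.List.pyGet? forest y_pos).getD []).length : Int) = ((forest.headD []).length : Int)) ∨
        (0 ≤ y_pos ∧ x_pos = ((((PySem.List.pyGet? forest y_pos).getD []).length : Int)) - 1 ∧
         ((forest.headD []).length : Int) ≤ (((PySem.List.pyGet? forest y_pos).getD []).length : Int)) := by
      exact hrt rfl
    have hstep : pv_step x_pos y_pos "right" = (x_pos + 1, y_pos) := by simp [pv_step]
    rw [hstep]
    rcases hC with ⟨hy0, hxm1, hxw0, hrleq⟩ | ⟨hy0, hxe, hwle⟩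
    · have hynat : y_pos.toNat < forest.length := by omega
      have hrowget : (PySem.List.pyGet? forest y_pos).getD [] = forest[y_pos.toNat] := by
        rw [PySem.List.pyGet?_of_nonneg _ hy0]
        simp [List.getElem?_eq_getElem hynat]
      have hrowlen : ((forest[y_pos.toNat] : List Int).length : Int) = w := by
        rw [hwlen, ← hrowget]
        exact_mod_cast hrleq
      rw [path_right forest w forest.length forest[y_pos.toNat] y_pos hy0 (by exact_mod_cast hyh)
        hrowget hrowlen _ (x_pos + 1) (by omega) (by omega) (by omega)]
      rw [hrowget, PySem.List.slice_from _ (show (0:Int) ≤ x_pos + 1 by omega)]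
      simp
    · obtain ⟨f, hf⟩ : ∃ f, (w + (forest.length : Int) + 2).toNat = f + 1 :=
        ⟨(w + (forest.length : Int) + 2).toNat - 1, by omega⟩
      rw [hf]
      have hb : pv_in_bounds (x_pos + 1) y_pos w forest.length = false := by
        simp only [pv_in_bounds, Bool.and_eq_false_iff, decide_eq_false_iff_not]
        left; omega
      have hsl : PySem.List.slice ((PySem.List.pyGet? forest y_pos).getD [])
          (some (x_pos + 1)) none = [] := by
        rw [PySem.List.slice_from _ (show (0:Int) ≤ x_pos + 1 by omega)]
        exact List.drop_eq_nil_of_le (by omega)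
      simp [pvPath, hb, pvScanB, hsl]
  · by_cases hl : direction = "left"
    · subst hl
      have hC : (0 ≤ y_pos ∧ 0 ≤ x_pos ∧ x_pos < ((forest.headD []).length : Int) ∧
          (((PySem.List.pyGet? forest y_pos).getD []).length : Int) = ((forest.headD []).length : Int)) ∨
          (0 ≤ y_pos ∧ (x_pos = 0 ∨
            x_pos = -((((PySem.List.pyGet? forest y_pos).getD []).length : Int)))) := by
        exact hlf rfl
      have hstep : pv_step x_pos y_pos "left" = (x_pos - 1, y_pos) := by simp [pv_step]
      rw [hstep]
      rcases hC with ⟨hy0, hx0, hxw0, hrleq⟩ | ⟨hy0, hx0or⟩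
      · have hynat : y_pos.toNat < forest.length := by omega
        have hrowget : (PySem.List.pyGet? forest y_pos).getD [] = forest[y_pos.toNat] := by
          rw [PySem.List.pyGet?_of_nonneg _ hy0]
          simp [List.getElem?_eq_getElem hynat]
        have hrowlen : ((forest[y_pos.toNat] : List Int).length : Int) = w := by
          rw [hwlen, ← hrowget]
          exact_mod_cast hrleq
        rw [path_left forest w forest.length forest[y_pos.toNat] y_pos hy0 (by exact_mod_cast hyh)
          hrowget hrowlen _ (x_pos - 1) (by omega) (by omega) (by omega)]
        have : (x_pos - 1 + 1).toNat = x_pos.toNat := by omega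
        rw [this]
        rw [hrowget, PySem.List.slice_to _ hx0]
        simp
      · obtain ⟨f, hf⟩ : ∃ f, (w + (forest.length : Int) + 2).toNat = f + 1 :=
          ⟨(w + (forest.length : Int) + 2).toNat - 1, by omega⟩
        rw [hf]
        have hrl0 : (0:Int) < (((PySem.List.pyGet? forest y_pos).getD []).length : Int) := by
          omega
        have hb : pv_in_bounds (x_pos - 1) y_pos w forest.length = false := by
          simp only [pv_in_bounds, Bool.and_eq_false_iff, decide_eq_false_iff_not]
          left; omega
        have hsl : PySem.List.slice ((PySem.List.pyGet? forest y_pos).getD [])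
            none (some x_pos) = [] := by
          rcases hx0or with h0 | hneg
          · subst h0
            rw [PySem.List.slice_to _ le_rfl]
            simp
          · rw [hneg, PySem.List.slice_to_neg_natCast _ _ (by exact_mod_cast hrl0)]
            simp
        simp [pvPath, hb, pvScanB, hsl]
    · by_cases hd : direction = "down"
      · subst hd
        have hC : (-1 ≤ y_pos ∧ 0 ≤ x_pos ∧ x_pos < ((forest.headD []).length : Int)) ∨
            y_pos = (forest.length : Int) - 1 := by
          exact (hdn rfl).2
        have hstep : pv_step x_pos y_pos "down" = (x_pos, y_pos + 1) := by simp [pv_step]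
        rw [hstep]
        rcases hC with ⟨hym1, hx0, hxw0⟩ | hye
        · have hxw' : x_pos < w := by rw [hwlen]; omega
          rw [path_down forest w forest.length x_pos hx0 hxw' rfl _ (y_pos + 1)
            (by omega) (by omega) (by omega)]
          rw [PySem.List.slice_from _ (show (0:Int) ≤ y_pos + 1 by omega)]
          simp
        · obtain ⟨f, hf⟩ : ∃ f, (w + (forest.length : Int) + 2).toNat = f + 1 :=
            ⟨(w + (forest.length : Int) + 2).toNat - 1, by omega⟩
          rw [hf]
          have hb : pv_in_bounds x_pos (y_pos + 1) w forest.length = false := by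
            simp only [pv_in_bounds, Bool.and_eq_false_iff, decide_eq_false_iff_not]
            right; omega
          have hsl : PySem.List.slice forest (some (y_pos + 1)) none = [] := by
            rw [PySem.List.slice_from _ (show (0:Int) ≤ y_pos + 1 by omega)]
            exact List.drop_eq_nil_of_le (by omega)
          simp [pvPath, hb, pvScanB, hsl]
      · by_cases hu : direction = "up"
        · subst hu
          have hC : (0 ≤ y_pos ∧ 0 ≤ x_pos ∧ x_pos < ((forest.headD []).length : Int)) ∨
              y_pos = 0 ∨ y_pos = -(forest.length : Int) := by
            exact (hup rfl).2
          have hstep : pv_step x_pos y_pos "up" = (x_pos, y_pos - 1) := by simp [pv_step]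
          rw [hstep]
          rcases hC with ⟨hy0, hx0, hxw0⟩ | hye
          · have hxw' : x_pos < w := by rw [hwlen]; omega
            rw [path_up forest w forest.length x_pos hx0 hxw' rfl _ (y_pos - 1)
              (by omega) (by omega) (by omega)]
            have : (y_pos - 1 + 1).toNat = y_pos.toNat := by omega
            rw [this]
            rw [PySem.List.slice_to _ hy0]
            simp
          · obtain ⟨f, hf⟩ : ∃ f, (w + (forest.length : Int) + 2).toNat = f + 1 :=
              ⟨(w + (forest.length : Int) + 2).toNat - 1, by omega⟩
            rw [hf]
            have hb : pv_in_bounds x_pos (y_pos - 1) w forest.length = false := by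
              simp only [pv_in_bounds, Bool.and_eq_false_iff, decide_eq_false_iff_not]
              right; omega
            have hsl : PySem.List.slice forest none (some y_pos) = [] := by
              rcases hye with h0 | hneg
              · subst h0
                rw [PySem.List.slice_to _ le_rfl]
                simp
              · rw [hneg, PySem.List.slice_to_neg_natCast _ _ (by exact_mod_cast hH)]
                simp
            simp [pvPath, hb, pvScanB, hsl]
        · have hstep : pv_step x_pos y_pos direction = (-1, -1) := by
            simp [pv_step, hr, hl, hu, hd]
          rw [hstep]
          obtain ⟨f, hf⟩ : ∃ f, (w + (forest.length : Int) + 2).toNat = f + 1 :=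
            ⟨(w + (forest.length : Int) + 2).toNat - 1, by omega⟩
          rw [hf]
          have hb : pv_in_bounds (-1) (-1) w forest.length = false := by
            simp [pv_in_bounds]
          simp [pvPath, hb, pvScanB, hr, hl, hu, hd]
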